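-- pv_equiv track=rewrite | github.com/super-quantum/rmsynth | src/api/python/rmsynth/rotk.py | _rebuild_from_planes
-- ===== SOURCE A (Python) =====
-- from typing import Dict, List, Tuple, Optional, Sequence, Union
--
-- def _rebuild_from_planes(planes: List[List[int]], k: int) -> List[int]:
--     """
--     Recombine per-plane parity layers (MSB..LSB) back into a length-L vector mod 2^k,
--     *without* inter-plane carry (i.e., interpret each column as a k-bit word).
--     """
--     assert len(planes) >= 1
--     L = len(planes[0])
--     out = [0] * L
--     for ell in range(1, k + 1):  # MSB->LSB
--         bit = k - ell
--         p = planes[ell - 1]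
--         for j in range(L):
--             if p[j] & 1:
--                 out[j] |= (1 << bit)
--     return out
-- ===== SOURCE B (Python) =====
-- def _rebuild_from_planes(planes, k):
--     """
--     Recombine per-plane parity layers (MSB..LSB) back into a length-L vector mod 2^k,
--     column-major: each output word is rebuilt by Horner-style shift-accumulate.
--     """
--     assert len(planes) >= 1
--     L = len(planes[0])
--     out = []
--     for j in range(L):
--         word = 0
--         for ell in range(1, k + 1):  # MSB first
--             word = (word << 1) | (planes[ell - 1][j] & 1)
--         out.append(word)
--     return out
-- ===== Notes on version B (the rewrite author's own statement) =====
-- stated objective: alternative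
-- what changed: Column-major Horner shift-accumulate: each output word is built by word=(word<<1)|bit over the planes, instead of A's plane-major scatter that ORs a precomputed 1<<(k-ell) into a fixed bit position of a preallocated output array.
import Mathlib
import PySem

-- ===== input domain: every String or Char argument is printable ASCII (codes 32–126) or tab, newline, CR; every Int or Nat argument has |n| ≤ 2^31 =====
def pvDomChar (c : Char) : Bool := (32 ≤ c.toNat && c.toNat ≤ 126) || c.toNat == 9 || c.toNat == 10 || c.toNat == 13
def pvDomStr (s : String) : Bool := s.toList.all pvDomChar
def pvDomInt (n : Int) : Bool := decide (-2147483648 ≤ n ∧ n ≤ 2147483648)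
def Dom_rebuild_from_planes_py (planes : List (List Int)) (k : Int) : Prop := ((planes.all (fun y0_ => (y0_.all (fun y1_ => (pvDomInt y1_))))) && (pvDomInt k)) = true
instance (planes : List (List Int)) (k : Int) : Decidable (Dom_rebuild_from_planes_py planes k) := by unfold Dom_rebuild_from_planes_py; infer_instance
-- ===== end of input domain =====

-- B rebuilds each k-bit word column-major by Horner shift-accumulate instead of A's
-- plane-major scatter of 1<<(k-ell) into a preallocated output (alternative decomposition, same cost).

-- ===== PORT A =====
-- '1 << bit' is ported as '(1 : Int) <<< bit.toNat': exact, since bit = k - ell ≥ 0 whenever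
-- the loop body runs (1 ≤ ell ≤ k).  The '.getD' defaults are never taken under Pre_.
def rebuild_from_planes_py (planes : List (List Int)) (k : Int) : List Int :=
  -- assert len(planes) >= 1  (AssertionError on [] is excluded by Pre_)
  let L := ((PySem.List.pyGet? planes 0).getD []).length
  let out : List Int := List.replicate L 0
  (PySem.List.pyRange 1 (k + 1) 1).foldl (fun out ell =>
    let bit := k - ell
    let p := (PySem.List.pyGet? planes (ell - 1)).getD []
    (PySem.List.pyRange 0 (L : Int) 1).foldl (fun out j =>
      if PySem.Int.band ((PySem.List.pyGet? p j).getD 0) 1 ≠ 0 then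
        out.set j.toNat (PySem.Int.bor ((PySem.List.pyGet? out j).getD 0) ((1 : Int) <<< bit.toNat))
      else out) out) out

-- ===== PORT B =====
-- 'word << 1' is ported as 'word <<< 1' (shift amount is the Nat literal 1; exact for all ints).
def rebuild_from_planes_py_alt (planes : List (List Int)) (k : Int) : List Int :=
  -- assert len(planes) >= 1  (AssertionError on [] is excluded by Pre_)
  let L := ((PySem.List.pyGet? planes 0).getD []).length
  (PySem.List.pyRange 0 (L : Int) 1).foldl (fun out j =>
    out ++ [(PySem.List.pyRange 1 (k + 1) 1).foldl (fun word ell =>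
      PySem.Int.bor (word <<< 1)
        (PySem.Int.band ((PySem.List.pyGet? ((PySem.List.pyGet? planes (ell - 1)).getD []) j).getD 0) 1)) 0]) []

-- ===== PRECONDITION & SPEC =====
-- Pre_ is exactly A's return domain: A raises AssertionError on planes = [] and IndexError
-- when k exceeds the number of planes or one of the first k planes is shorter than planes[0].
def Pre_rebuild_from_planes_py (planes : List (List Int)) (k : Int) : Prop :=
  planes ≠ [] ∧ k ≤ (planes.length : Int) ∧
    ∀ p ∈ planes.take k.toNat, (planes.headI).length ≤ p.length
instance (planes : List (List Int)) (k : Int) : Decidable (Pre_rebuild_from_planes_py planes k) := by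
  unfold Pre_rebuild_from_planes_py; infer_instance

def pvWitness_rebuild_from_planes_py : List (List Int) × Int := ([[1, 0], [0, 1]], 2)

def Spec_rebuild_from_planes_py (planes : List (List Int)) (k : Int) (out : List Int) : Prop :=
  out = rebuild_from_planes_py_alt planes k
instance (planes : List (List Int)) (k : Int) (out : List Int) : Decidable (Spec_rebuild_from_planes_py planes k out) := by
  unfold Spec_rebuild_from_planes_py; infer_instance

-- ===== CLAIM (what is proved, stated in full; the proofs are below) =====
def Claim_equal_rebuild_from_planes_py : Prop := ∀ (planes : List (List Int)) (k : Int), Dom_rebuild_from_planes_py planes k → Pre_rebuild_from_planes_py planes k → Spec_rebuild_from_planes_py planes k (rebuild_from_planes_py planes k)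

-- ===== LEMMAS AND PROOFS =====

-- Disjoint-bit OR facts (via Nat.lor_bit).
lemma pv_lor_double (a b : Nat) : (2 * a) ||| (2 * b) = 2 * (a ||| b) := by
  have := Nat.lor_bit false a false b
  simpa [Nat.bit_val, Nat.mul_comm] using this

lemma pv_lor_double_one (a : Nat) : (2 * a) ||| 1 = 2 * a + 1 := by
  have := Nat.lor_bit false a true 0
  simpa [Nat.bit_val, Nat.mul_comm] using this

-- A fold whose transitions are Nat-casts computes a Nat-cast.
lemma pv_cast_fold {α : Type} (l : List α) (fI : Int → α → Int) (fN : Nat → α → Nat)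
    (h : ∀ (a : Nat) (t : α), t ∈ l → fI (a : Int) t = ((fN a t : Nat) : Int)) :
    ∀ a : Nat, l.foldl fI (a : Int) = ((l.foldl fN a : Nat) : Int) := by
  induction l with
  | nil => intro a; rfl
  | cons x xs ih =>
    intro a
    simp only [List.foldl_cons]
    rw [h a x (by simp)]
    exact ih (fun a t ht => h a t (by simp [ht])) _

-- Doubling both the accumulator and the OR-ed constants doubles the fold.
lemma pv_dbl (C : Nat → Prop) [DecidablePred C] (e : Nat → Nat) (l : List Nat) :
    ∀ a : Nat, l.foldl (fun v t => if C t then v ||| (2 * e t) else v) (2 * a)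
      = 2 * l.foldl (fun v t => if C t then v ||| e t else v) a := by
  induction l with
  | nil => intro a; rfl
  | cons x xs ih =>
    intro a
    simp only [List.foldl_cons]
    by_cases h : C x
    · simp only [h, if_pos, pv_lor_double]; exact ih _
    · simp only [h, if_neg, not_false_iff]; exact ih _

-- Key bit identity on Nat: scattering 1 <<< (m-1-t) MSB-first equals Horner shift-accumulate.
lemma pv_keyN (C : Nat → Prop) [DecidablePred C] :
    ∀ m : Nat,
      (List.range m).foldl (fun v t => if C t then v ||| (1 <<< (m - 1 - t)) else v) 0
        = (List.range m).foldl (fun w t => (w <<< 1) ||| (if C t then 1 else 0)) 0 := by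
  intro m
  induction m with
  | zero => rfl
  | succ m ih =>
    rw [List.range_succ, List.foldl_append, List.foldl_append]
    simp only [List.foldl_cons, List.foldl_nil]
    have hpref : (List.range m).foldl (fun v t => if C t then v ||| (1 <<< (m + 1 - 1 - t)) else v) 0
        = 2 * (List.range m).foldl (fun v t => if C t then v ||| (1 <<< (m - 1 - t)) else v) 0 := by
      have hc : (List.range m).foldl (fun v t => if C t then v ||| (1 <<< (m + 1 - 1 - t)) else v) 0
          = (List.range m).foldl (fun v t => if C t then v ||| (2 * (1 <<< (m - 1 - t))) else v) 0 := by
        apply PySem.List.foldl_congr_mem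
        intro acc t ht
        have htm : t < m := List.mem_range.mp ht
        have : m + 1 - 1 - t = (m - 1 - t) + 1 := by omega
        rw [this, Nat.shiftLeft_succ, Nat.mul_comm]
      rw [hc]
      have := pv_dbl C (fun t => 1 <<< (m - 1 - t)) (List.range m) 0
      simpa using this
    rw [hpref, ih]
    have e2 : ∀ w : Nat, w <<< 1 = 2 * w := by
      intro w; rw [Nat.shiftLeft_eq, pow_one, Nat.mul_comm]
    by_cases h : C m
    · rw [if_pos h, if_pos h]
      have h1 : m + 1 - 1 - m = 0 := by omega
      rw [h1]
      have e1 : (1 : Nat) <<< 0 = 1 := rfl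
      rw [e1, e2, pv_lor_double_one]
    · rw [if_neg h, if_neg h, e2]
      exact (Nat.or_zero _).symm

-- The same identity at Int (all values involved are Nat-casts).
lemma pv_keyInt (C : Nat → Prop) [DecidablePred C] (m : Nat) :
    (List.range m).foldl (fun v t => if C t then PySem.Int.bor v ((1 : Int) <<< (m - 1 - t)) else v) (0 : Int)
      = (List.range m).foldl (fun w t => PySem.Int.bor (w <<< 1) (if C t then (1 : Int) else 0)) 0 := by
  have h1 := pv_cast_fold (List.range m)
    (fun v t => if C t then PySem.Int.bor v ((1 : Int) <<< (m - 1 - t)) else v)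
    (fun v t => if C t then v ||| (1 <<< (m - 1 - t)) else v)
    (by
      intro a t _
      by_cases h : C t
      · have hs : (1 : Int) <<< (m - 1 - t) = (((1 <<< (m - 1 - t) : Nat)) : Int) := rfl
        simp only [h, if_pos, hs, PySem.Int.bor_natCast]
      · simp [h]) 0
  have h2 := pv_cast_fold (List.range m)
    (fun w t => PySem.Int.bor (w <<< 1) (if C t then (1 : Int) else 0))
    (fun w t => (w <<< 1) ||| (if C t then 1 else 0))
    (by
      intro a t _
      simp only []
      have hs : ((a : Int)) <<< 1 = (((a <<< 1 : Nat)) : Int) := rfl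
      by_cases h : C t
      · rw [if_pos h, if_pos h, hs, ← PySem.Int.bor_natCast, Nat.cast_one]
      · rw [if_neg h, if_neg h, hs, ← PySem.Int.bor_natCast, Nat.cast_zero]) 0
  simp only [Nat.cast_zero] at h1 h2
  rw [h1, h2, pv_keyN C m]

-- Per-column identity: A's per-column update sequence equals B's Horner word, for any
-- bit source x : Int → Int read at ell = 1..k.
lemma pv_percol (x : Int → Int) (k : Int) :
    (PySem.List.pyRange 1 (k + 1) 1).foldl
        (fun v ell => if PySem.Int.band (x ell) 1 ≠ 0 then PySem.Int.bor v ((1 : Int) <<< (k - ell).toNat) else v) 0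
      = (PySem.List.pyRange 1 (k + 1) 1).foldl
        (fun w ell => PySem.Int.bor (w <<< 1) (PySem.Int.band (x ell) 1)) 0 := by
  have hm : (k + 1 - 1).toNat = k.toNat := by omega
  rw [PySem.List.pyRange_one, hm]
  rw [List.foldl_map, List.foldl_map]
  set m := k.toNat with hmdef
  have hB : (List.range m).foldl (fun w (t : Nat) => PySem.Int.bor (w <<< 1) (PySem.Int.band (x (1 + (t : Int))) 1)) 0
      = (List.range m).foldl (fun w (t : Nat) => PySem.Int.bor (w <<< 1) (if PySem.Int.band (x (1 + (t : Int))) 1 ≠ 0 then (1 : Int) else 0)) 0 := by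
    apply PySem.List.foldl_congr_mem
    intro acc t _
    have hb : PySem.Int.band (x (1 + (t : Int))) 1 = PySem.Int.mod (x (1 + (t : Int))) 2 := PySem.Int.band_one _
    have h01 : PySem.Int.mod (x (1 + (t : Int))) 2 = 0 ∨ PySem.Int.mod (x (1 + (t : Int))) 2 = 1 := by
      have h := Int.emod_two_eq (x (1 + (t : Int)))
      have : PySem.Int.mod (x (1 + (t : Int))) 2 = (x (1 + (t : Int))) % 2 := by
        simp [PySem.Int.mod, Int.fmod_eq_emod]
      omega
    rcases h01 with h0 | h1
    · rw [hb, h0]; simp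
    · rw [hb, h1]; simp
  have hA : (List.range m).foldl
        (fun v (t : Nat) => if PySem.Int.band (x (1 + (t : Int))) 1 ≠ 0 then PySem.Int.bor v ((1 : Int) <<< (k - (1 + (t : Int))).toNat) else v) 0
      = (List.range m).foldl
        (fun v (t : Nat) => if PySem.Int.band (x (1 + (t : Int))) 1 ≠ 0 then PySem.Int.bor v ((1 : Int) <<< (m - 1 - t)) else v) 0 := by
    apply PySem.List.foldl_congr_mem
    intro acc t ht
    have htm : t < m := List.mem_range.mp ht
    have : (k - (1 + (t : Int))).toNat = m - 1 - t := by omega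
    rw [this]
  rw [hA, hB]
  exact pv_keyInt (fun t => PySem.Int.band (x (1 + (t : Int))) 1 ≠ 0) m

-- A's inner loop (one plane, all columns), pointwise.
lemma pv_innerA (C : Nat → Prop) [DecidablePred C] (G : Int) (o : List Int) :
    ∀ n : Nat, n ≤ o.length →
      (((List.range n).foldl (fun o t => if C t then o.set t (PySem.Int.bor (o[t]?.getD 0) G) else o) o).length = o.length
      ∧ ∀ j : Nat, ((List.range n).foldl (fun o t => if C t then o.set t (PySem.Int.bor (o[t]?.getD 0) G) else o) o)[j]?
          = if j < n ∧ C j then some (PySem.Int.bor (o[j]?.getD 0) G) else o[j]?) := by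
  intro n
  induction n with
  | zero => intro _; refine ⟨rfl, fun j => ?_⟩; simp
  | succ n ih =>
    intro hle
    obtain ⟨ihlen, ihget⟩ := ih (by omega)
    rw [List.range_succ, List.foldl_append]
    simp only [List.foldl_cons, List.foldl_nil]
    set F := (List.range n).foldl (fun o t => if C t then o.set t (PySem.Int.bor (o[t]?.getD 0) G) else o) o with hF
    have hFn : F[n]? = o[n]? := by rw [ihget n]; simp
    by_cases hC : C n
    · rw [if_pos hC]
      constructor
      · rw [List.length_set, ihlen]
      · intro j
        rw [List.getElem?_set]
        rcases eq_or_ne n j with rfl | hne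
        · have hlt : n < F.length := by rw [ihlen]; omega
          rw [if_pos rfl, if_pos hlt, hFn]
          have h2 : n < n + 1 ∧ C n := ⟨by omega, hC⟩
          rw [if_pos h2]
        · rw [if_neg hne, ihget j]
          by_cases hj : j < n ∧ C j
          · have h2 : j < n + 1 ∧ C j := ⟨by omega, hj.2⟩
            rw [if_pos hj, if_pos h2]
          · have h2 : ¬ (j < n + 1 ∧ C j) := by
              intro h
              rcases Nat.lt_succ_iff_lt_or_eq.mp h.1 with h' | rfl
              · exact hj ⟨h', h.2⟩
              · exact hne rfl
            rw [if_neg hj, if_neg h2]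
    · rw [if_neg hC]
      refine ⟨ihlen, fun j => ?_⟩
      rw [ihget j]
      by_cases hj : j < n ∧ C j
      · have h2 : j < n + 1 ∧ C j := ⟨by omega, hj.2⟩
        rw [if_pos hj, if_pos h2]
      · have h2 : ¬ (j < n + 1 ∧ C j) := by
          intro h
          rcases Nat.lt_succ_iff_lt_or_eq.mp h.1 with h' | rfl
          · exact hj ⟨h', h.2⟩
          · exact hC h.2
        rw [if_neg hj, if_neg h2]

-- A's outer loop (all planes), pointwise: column j of the final array is the per-column fold.
lemma pv_outerA (C : Int → Nat → Prop) [inst : ∀ e t, Decidable (C e t)] (G : Int → Int) (L : Nat) :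
    ∀ (es : List Int) (out : List Int), out.length = L →
      ((es.foldl (fun out ell => (List.range L).foldl
          (fun o t => if C ell t then o.set t (PySem.Int.bor (o[t]?.getD 0) (G ell)) else o) out) out).length = L
      ∧ ∀ j : Nat, j < L →
          (es.foldl (fun out ell => (List.range L).foldl
            (fun o t => if C ell t then o.set t (PySem.Int.bor (o[t]?.getD 0) (G ell)) else o) out) out)[j]?
          = some (es.foldl (fun v ell => if C ell j then PySem.Int.bor v (G ell) else v) (out[j]?.getD 0))) := by
  intro es
  induction es with
  | nil =>
    intro out hlen
    refine ⟨hlen, fun j hj => ?_⟩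
    simp only [List.foldl_nil]
    have : j < out.length := by omega
    rw [List.getElem?_eq_getElem this]
    simp
  | cons e es ih =>
    intro out hlen
    simp only [List.foldl_cons]
    obtain ⟨hilen, higet⟩ := pv_innerA (C e) (G e) out L (by omega)
    set out1 := (List.range L).foldl (fun o t => if C e t then o.set t (PySem.Int.bor (o[t]?.getD 0) (G e)) else o) out with hout1
    obtain ⟨rlen, rget⟩ := ih out1 (by rw [hilen, hlen])
    refine ⟨rlen, fun j hj => ?_⟩
    rw [rget j hj]
    congr 1
    rw [higet j]
    by_cases hc : C e j
    · have h2 : j < L ∧ C e j := ⟨hj, hc⟩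
      rw [if_pos h2, if_pos hc, Option.getD_some]
    · have h2 : ¬ (j < L ∧ C e j) := fun h => hc h.2
      rw [if_neg h2, if_neg hc]

-- ===== VERDICT (by name: the statement is the Claim_ definition above) =====
theorem rebuild_from_planes_py_spec : Claim_equal_rebuild_from_planes_py := by
  intro planes k _ hPre
  obtain ⟨hne, hk, _⟩ := hPre
  unfold Spec_rebuild_from_planes_py
  cases planes with
  | nil => exact absurd rfl hne
  | cons q rest =>
    simp only [rebuild_from_planes_py, rebuild_from_planes_py_alt,
      PySem.List.pyGet?_zero_cons, Option.getD_some]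
    set L := q.length with hL
    rw [PySem.List.foldl_append_singleton_eq_map, List.nil_append,
      PySem.List.pyRange_zero_natCast, List.map_map]
    simp only [Function.comp_def, List.foldl_map, PySem.List.pyGet?_natCast, Int.toNat_natCast]
    obtain ⟨hAlen, hAget⟩ := pv_outerA
      (fun ell t => PySem.Int.band (((PySem.List.pyGet? (q :: rest) (ell - 1)).getD [])[t]?.getD 0) 1 ≠ 0)
      (fun ell => (1 : Int) <<< (k - ell).toNat) L
      (PySem.List.pyRange 1 (k + 1) 1) (List.replicate L 0) (by simp)
    apply List.ext_getElem?
    intro j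
    by_cases hj : j < L
    · rw [hAget j hj]
      rw [List.getElem?_map, List.getElem?_range hj, Option.map_some]
      have hstart : (List.replicate L (0 : Int))[j]?.getD 0 = 0 := by
        simp [hj]
      rw [hstart]
      congr 1
      have hpc := pv_percol
        (fun ell => (PySem.List.pyGet? ((PySem.List.pyGet? (q :: rest) (ell - 1)).getD []) ((j : Nat) : Int)).getD 0) k
      simp only [PySem.List.pyGet?_natCast] at hpc
      exact hpc
    · rw [List.getElem?_eq_none (by rw [hAlen]; omega),
        List.getElem?_eq_none (by simp; omega)]
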